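-- pv_equiv track=rewrite | github.com/dozinq/Daily_Algorithm | PROGRAMMERS/solved/42888.py | search_nick
-- ===== SOURCE A (Python) =====
-- def search_nick(string):
--     nick = ""
--     for idx in range(len(string)-1, -1, -1):
--         # 공백의 ord 값은 32
--         if ord(string[idx]) == 32:
--             break
--         nick += string[idx]
--     # string 뒤집기
--     nick = nick[::-1]
--     return nick
-- ===== SOURCE B (Python) =====
-- def search_nick(string):
--     return string.split(' ')[-1]
-- ===== Notes on version B (the rewrite author's own statement) =====
-- stated objective: idiomatic
-- what changed: B splits the string forward into space-delimited tokens and returns the last one, replacing A's backward character-by-character scan with string accumulator and reverse.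
import Mathlib
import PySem

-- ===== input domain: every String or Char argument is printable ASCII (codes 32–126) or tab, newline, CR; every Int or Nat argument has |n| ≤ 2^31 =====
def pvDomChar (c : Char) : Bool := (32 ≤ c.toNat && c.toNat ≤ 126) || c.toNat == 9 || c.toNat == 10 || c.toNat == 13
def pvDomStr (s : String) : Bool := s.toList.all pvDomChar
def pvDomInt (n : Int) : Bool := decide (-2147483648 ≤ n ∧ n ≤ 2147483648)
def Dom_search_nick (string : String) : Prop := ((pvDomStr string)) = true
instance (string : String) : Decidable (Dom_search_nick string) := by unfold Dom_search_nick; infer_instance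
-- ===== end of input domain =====

-- B is the idiomatic rewrite: split the string forward on ' ' and take the last token,
-- instead of A's backward character scan with an accumulator and a final reverse.


-- ===== PORT A =====
-- the for-loop over range(len(string)-1, -1, -1) with its break;
-- pyGet? never returns none here since the range indices are in range (no IndexError)
def search_nick_loop (s : List Char) : List Int → List Char → List Char
  | [], nick => nick
  | idx :: rest, nick =>
    match PySem.List.pyGet? s idx with
    | none => nick
    | some c => if c.toNat == 32 then nick else search_nick_loop s rest (nick ++ [c])

def search_nick (string : String) : String :=
  -- nick = loop result; return nick[::-1]
  String.ofList ((PySem.List.slice?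
    (search_nick_loop string.toList
      (PySem.List.pyRange ((string.toList.length : Int) - 1) (-1) (-1)) [])
    none none (-1)).getD [])

-- ===== PORT B =====
-- string.split(' ')[-1]; split with a nonempty separator always returns a nonempty
-- list, so pyGet? … (-1) is some and the getD defaults are never used (no IndexError)
def search_nick_alt (string : String) : String :=
  (PySem.List.pyGet? ((PySem.Str.split? string " ").getD []) (-1)).getD ""

-- ===== PRECONDITION & SPEC =====
def Spec_search_nick (string : String) (out : String) : Prop := out = search_nick_alt string
instance (string : String) (out : String) : Decidable (Spec_search_nick string out) := by unfold Spec_search_nick; infer_instance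

-- ===== CLAIM (what is proved, stated in full; the proofs are below) =====
def Claim_equal_search_nick : Prop := ∀ (string : String), Dom_search_nick string → Spec_search_nick string (search_nick string)

-- ===== LEMMAS AND PROOFS =====

-- the common characterisation: the suffix of cs after its last space
def pvP (c : Char) : Bool := !(c == ' ')

def pvSuffixAfter (cs : List Char) : List Char := (cs.reverse.takeWhile pvP).reverse

theorem pvP_eq_true {c : Char} (h : c ≠ ' ') : pvP c = true := by
  simp [pvP, h]

theorem pvToNat32 {c : Char} (h : c.toNat = 32) : c = ' ' := by
  have h' : c.val.toNat = (' ').val.toNat := h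
  exact Char.ext (UInt32.toNat_inj.mp h')

theorem pvTakeWhile_self {cs : List Char} (h : ' ' ∉ cs) :
    cs.takeWhile pvP = cs :=
  List.takeWhile_eq_self_iff.mpr fun _ hc => pvP_eq_true (fun he => h (he ▸ hc))

theorem pvTakeWhile_len {cs : List Char} (h : ' ' ∈ cs) :
    (cs.takeWhile pvP).length ≠ cs.length := by
  intro hl
  have heq : cs.takeWhile pvP = cs := (List.takeWhile_sublist _).eq_of_length hl
  have := List.takeWhile_eq_self_iff.mp heq ' ' h
  simp [pvP] at this

theorem pvSuffixAfter_of_not_mem (cs : List Char) (h : ' ' ∉ cs) :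
    pvSuffixAfter cs = cs := by
  unfold pvSuffixAfter
  rw [pvTakeWhile_self (by simpa using h), List.reverse_reverse]

theorem pvSuffixAfter_cons_of_mem (c : Char) (cs : List Char) (h : ' ' ∈ cs) :
    pvSuffixAfter (c :: cs) = pvSuffixAfter cs := by
  unfold pvSuffixAfter
  rw [List.reverse_cons, List.takeWhile_append,
      if_neg (pvTakeWhile_len (by simpa using h))]

theorem pvSuffixAfter_space_cons (cs : List Char) (h : ' ' ∉ cs) :
    pvSuffixAfter (' ' :: cs) = cs := by
  unfold pvSuffixAfter
  have hall := pvTakeWhile_self (cs := cs.reverse) (by simpa using h)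
  rw [List.reverse_cons, List.takeWhile_append, if_pos (by rw [hall])]
  have : [' '].takeWhile pvP = [] := rfl
  rw [this, List.append_nil, List.reverse_reverse]

-- ----- A side -----

-- the loop of A rephrased over the reversed character list
def pvRevLoop : List Char → List Char → List Char
  | [], nick => nick
  | c :: rest, nick => if c.toNat == 32 then nick else pvRevLoop rest (nick ++ [c])

theorem pvLoop_eq_revLoop (s : List Char) (k : Nat) (hk : k ≤ s.length) (nick : List Char) :
    search_nick_loop s (PySem.List.pyRange ((k : Int) - 1) (-1) (-1)) nick
      = pvRevLoop ((s.take k).reverse) nick := by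
  induction k generalizing nick with
  | zero =>
    rw [PySem.List.pyRange_neg_one_eq_nil (by omega)]
    simp [search_nick_loop, pvRevLoop]
  | succ k ih =>
    have e1 : ((k + 1 : Nat) : Int) - 1 = (k : Int) := by push_cast; ring
    rw [e1, PySem.List.pyRange_neg_one_cons (by omega)]
    have hk' : k < s.length := by omega
    have hget : PySem.List.pyGet? s (k : Int) = some s[k] := by
      rw [PySem.List.pyGet?_natCast]
      simp [hk']
    have htake : (s.take (k + 1)).reverse = s[k] :: (s.take k).reverse := by
      rw [List.take_add_one, List.getElem?_eq_getElem hk']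
      simp
    rw [htake]
    unfold search_nick_loop pvRevLoop
    rw [hget]
    by_cases hc : (s[k]).toNat == 32
    · simp only [hc, if_true]
    · simp only [hc, if_false, Bool.false_eq_true]
      exact ih (by omega) _

theorem pvRevLoop_eq (rs nick : List Char) :
    pvRevLoop rs nick = nick ++ rs.takeWhile pvP := by
  induction rs generalizing nick with
  | nil => simp [pvRevLoop]
  | cons c rest ih =>
    unfold pvRevLoop
    by_cases hc : c = ' '
    · subst hc
      rw [if_pos (by decide)]
      have : (' ' :: rest).takeWhile pvP = [] := by
        rw [List.takeWhile_cons_of_neg (by decide)]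
      rw [this, List.append_nil]
    · have h32 : (c.toNat == 32) = false := by
        rw [beq_eq_false_iff_ne]
        exact fun h => hc (pvToNat32 h)
      rw [if_neg (by simp [h32]), ih,
          List.takeWhile_cons_of_pos (pvP_eq_true hc)]
      simp

theorem search_nick_eq (string : String) :
    search_nick string = String.ofList (pvSuffixAfter string.toList) := by
  unfold search_nick
  rw [pvLoop_eq_revLoop string.toList string.toList.length (le_refl _),
      List.take_length, pvRevLoop_eq, PySem.List.slice?_none_none_neg_one]
  simp [pvSuffixAfter]

-- ----- B side -----

theorem pvGo_getLast? (fuel : Nat) (l cur : List Char) (acc : List (List Char))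
    (hf : l.length ≤ fuel) :
    (PySem.Chars.splitOn.go [' '] fuel l cur acc).getLast?
      = some (if ' ' ∈ l then pvSuffixAfter l else cur.reverse ++ l) := by
  induction fuel generalizing l cur acc with
  | zero =>
    have hl : l = [] := List.eq_nil_of_length_eq_zero (by omega)
    subst hl
    simp [PySem.Chars.splitOn.go]
  | succ fuel ih =>
    cases l with
    | nil => simp [PySem.Chars.splitOn.go]
    | cons c rest =>
      simp only [PySem.Chars.splitOn.go]
      by_cases hc : c = ' '
      · rw [if_pos (by simp [hc, List.isPrefixOf])]
        simp only [List.length_cons] at hf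
        rw [show List.drop [' '].length (c :: rest) = rest by simp]
        rw [ih rest [] (cur.reverse :: acc) (by omega)]
        by_cases hm : ' ' ∈ rest
        · simp [hm, hc, pvSuffixAfter_cons_of_mem ' ' rest hm]
        · simp [hm, hc, pvSuffixAfter_space_cons rest hm]
      · rw [if_neg (by simp [List.isPrefixOf]; exact fun h => hc h.symm)]
        simp only [List.length_cons] at hf
        rw [ih rest (c :: cur) acc (by omega)]
        by_cases hm : ' ' ∈ rest
        · have hm' : ' ' ∈ c :: rest := List.mem_cons_of_mem _ hm
          simp [hm, hm', pvSuffixAfter_cons_of_mem c rest hm]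
        · have hnm : ' ' ∉ c :: rest := by
            intro h; rcases List.mem_cons.mp h with h | h
            · exact hc h.symm
            · exact hm h
          simp [hm, hnm]

theorem pvSplitOn_getLast? (cs : List Char) :
    (PySem.Chars.splitOn cs [' ']).getLast? = some (pvSuffixAfter cs) := by
  unfold PySem.Chars.splitOn
  rw [pvGo_getLast? (cs.length + 1) cs [] [] (by omega)]
  by_cases hm : ' ' ∈ cs
  · simp [hm]
  · simp [hm, pvSuffixAfter_of_not_mem cs hm]

theorem pvPyGet_neg_one {α : Type} (l : List α) (x : α) (h : l.getLast? = some x) :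
    PySem.List.pyGet? l (-1) = some x := by
  have hne : l ≠ [] := by intro hl; simp [hl] at h
  have hlen : 0 < l.length := List.length_pos_iff.mpr hne
  simp only [PySem.List.pyGet?, PySem.List.pyIdx?]
  rw [if_neg (by omega), if_pos (by omega : -(l.length : Int) ≤ -1)]
  simp only [Option.bind_some, Int.neg_neg, Int.toNat_one]
  rw [List.getElem?_eq_getElem (by omega)]
  rw [List.getLast?_eq_some_getLast hne, Option.some_inj] at h
  rw [← h, List.getLast_eq_getElem]

theorem search_nick_alt_eq (string : String) :
    search_nick_alt string = String.ofList (pvSuffixAfter string.toList) := by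
  unfold search_nick_alt
  have hsplit : PySem.Str.split? string " "
      = some ((PySem.Chars.splitOn string.toList [' ']).map String.ofList) := by
    unfold PySem.Str.split?
    rw [show (" " : String).toList = [' '] from rfl]
    simp [PySem.Chars.split?]
  rw [hsplit]
  have hlast : ((PySem.Chars.splitOn string.toList [' ']).map String.ofList).getLast?
      = some (String.ofList (pvSuffixAfter string.toList)) := by
    rw [List.getLast?_map, pvSplitOn_getLast?]
    rfl
  rw [Option.getD_some, pvPyGet_neg_one _ _ hlast, Option.getD_some]

-- ===== VERDICT (by name: the statement is the Claim_ definition above) =====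
theorem search_nick_spec : Claim_equal_search_nick := by
  intro string _
  unfold Spec_search_nick
  rw [search_nick_eq, search_nick_alt_eq]
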